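-- pv_equiv track=rewrite | github.com/posl/comment_recommendation | script/mod_gen/5_time/zh/110_D/3.py | solve
-- ===== SOURCE A (Python) =====
-- def solve(n, m):
--     # write code here
--     dp = [[0 for _ in range(m + 1)] for _ in range(n + 1)]
--     dp[0][1] = 1
--     for i in range(1, n + 1):
--         for j in range(1, m + 1):
--             for k in range(1, j + 1):
--                 if j % k == 0:
--                     dp[i][j] = (dp[i][j] + dp[i - 1][k]) % 1000000007
--     res = 0
--     for i in range(1, m + 1):
--         res = (res + dp[n][i]) % 1000000007
--     return res
-- ===== SOURCE B (Python) =====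
-- def solve(n, m):
--     MOD = 1000000007
--     dp = [0] * (m + 1)
--     dp[1] = 1
--     for _ in range(n):
--         nd = [0] * (m + 1)
--         for k in range(1, m + 1):
--             v = dp[k]
--             for j in range(k, m + 1, k):
--                 nd[j] = (nd[j] + v) % MOD
--         dp = nd
--     res = 0
--     for i in range(1, m + 1):
--         res = (res + dp[i]) % MOD
--     return res
-- ===== Notes on version B (the rewrite author's own statement) =====
-- stated objective: faster
-- what changed: Replaces the 2D table with per-row divisor scans (for each j test every k<=j) by a single rolling row updated by a divisor sieve (for each k add dp[k] to its multiples), dropping the O(m^2) inner scan to O(m log m) per step.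
import Mathlib
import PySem

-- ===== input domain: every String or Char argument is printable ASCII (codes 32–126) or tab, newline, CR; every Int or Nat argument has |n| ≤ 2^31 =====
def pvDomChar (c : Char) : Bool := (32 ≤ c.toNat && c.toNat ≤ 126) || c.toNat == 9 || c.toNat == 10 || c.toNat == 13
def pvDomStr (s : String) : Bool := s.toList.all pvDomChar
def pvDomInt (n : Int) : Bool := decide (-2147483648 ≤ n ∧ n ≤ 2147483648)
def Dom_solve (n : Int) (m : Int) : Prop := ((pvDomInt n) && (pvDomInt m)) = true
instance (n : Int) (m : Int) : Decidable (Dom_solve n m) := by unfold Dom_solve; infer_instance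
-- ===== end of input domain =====

-- B replaces A's 2D divisor-scan DP (for each j, scan all k ≤ j) by a rolling row updated with a
-- divisor sieve (for each k, add dp[k] to its multiples): O(n*m log m) instead of O(n*m^2).

-- ===== PORT A =====
-- all .toNat index conversions below are exact: under Pre_solve every index reaching them is ≥ 0 and in range
def solve (n : Int) (m : Int) : Int :=
  let dp : List (List Int) := List.replicate (n + 1).toNat (List.replicate (m + 1).toNat 0)
  let dp := dp.modify 0 (fun r => r.set 1 1)
  let dp := (PySem.List.pyRange 1 (n + 1)).foldl (fun dp i =>
    (PySem.List.pyRange 1 (m + 1)).foldl (fun dp j =>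
      (PySem.List.pyRange 1 (j + 1)).foldl (fun dp k =>
        if PySem.Int.mod j k == 0 then
          dp.modify i.toNat (fun r =>
            r.set j.toNat (PySem.Int.mod (r.getD j.toNat 0 +
              (dp.getD (i - 1).toNat []).getD k.toNat 0) 1000000007))
        else dp) dp) dp) dp
  (PySem.List.pyRange 1 (m + 1)).foldl (fun res i =>
    PySem.Int.mod (res + (dp.getD n.toNat []).getD i.toNat 0) 1000000007) 0

-- ===== PORT B =====
def solve_alt (n : Int) (m : Int) : Int :=
  let dp : List Int := (List.replicate (m + 1).toNat 0).set 1 1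
  let dp := (PySem.List.pyRange 0 n).foldl (fun dp _ =>
    (PySem.List.pyRange 1 (m + 1)).foldl (fun nd k =>
      let v := dp.getD k.toNat 0
      (PySem.List.pyRange k (m + 1) k).foldl (fun nd j =>
        nd.set j.toNat (PySem.Int.mod (nd.getD j.toNat 0 + v) 1000000007)) nd)
      (List.replicate (m + 1).toNat 0)) dp
  (PySem.List.pyRange 1 (m + 1)).foldl (fun res i =>
    PySem.Int.mod (res + dp.getD i.toNat 0) 1000000007) 0

-- ===== PRECONDITION & SPEC =====
-- A indexes dp[0][1]: it raises IndexError unless the table has a row 0 (n ≥ 0) and that row a cell 1 (m ≥ 1)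
def Pre_solve (n : Int) (m : Int) : Prop := 0 ≤ n ∧ 1 ≤ m
instance (n : Int) (m : Int) : Decidable (Pre_solve n m) := by unfold Pre_solve; infer_instance
def pvWitness_solve : Int × Int := (2, 4)

def Spec_solve (n : Int) (m : Int) (out : Int) : Prop := out = solve_alt n m
instance (n : Int) (m : Int) (out : Int) : Decidable (Spec_solve n m out) := by unfold Spec_solve; infer_instance

-- ===== CLAIM (what is proved, stated in full; the proofs are below) =====
def Claim_equal_solve : Prop := ∀ (n : Int) (m : Int), Dom_solve n m → Pre_solve n m → Spec_solve n m (solve n m)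

-- ===== LEMMAS AND PROOFS =====

def sieveStep (v : Int) (nd : List Int) (j : Int) : List Int :=
  nd.set j.toNat (PySem.Int.mod (nd.getD j.toNat 0 + v) 1000000007)

theorem getD_set_eq (l : List Int) (i j : Nat) (a : Int) :
    (l.set i a).getD j 0 = if i = j ∧ i < l.length then a else l.getD j 0 := by
  simp [List.getD_eq_getElem?_getD, List.getElem?_set]
  split_ifs with h1 h2 h3 h4 <;> simp_all
  omega

theorem getD_modify_eq {A : Type} (l : List A) (d : A) (i j : Nat) (f : A -> A) :
    (l.modify i f).getD j d = if i = j ∧ j < l.length then f (l.getD j d) else l.getD j d := by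
  simp [List.getD_eq_getElem?_getD, List.getElem?_modify]
  by_cases hj : j < l.length
  · rw [List.getElem?_eq_getElem hj]
    split_ifs with h1 h2 h3 <;> simp_all
  · rw [List.getElem?_eq_none (by omega)]
    split_ifs with h1 <;> simp_all

theorem length_foldl_sieve (v : Int) (L : List Int) (nd : List Int) :
    (L.foldl (sieveStep v) nd).length = nd.length := by
  induction L generalizing nd with
  | nil => rfl
  | cons x L ih => simp [List.foldl_cons, ih, sieveStep]

theorem foldl_sieve_getD (v : Int) : ∀ (L : List Int) (nd : List Int), L.Nodup →
    (∀ x ∈ L, 0 ≤ x ∧ x < (nd.length : Int)) → ∀ j : Nat,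
    (L.foldl (sieveStep v) nd).getD j 0 =
      if (j : Int) ∈ L then PySem.Int.mod (nd.getD j 0 + v) 1000000007 else nd.getD j 0 := by
  intro L
  induction L with
  | nil => intro nd _ _ j; simp
  | cons x L ih =>
    intro nd hnd hb j
    have hx := hb x (by simp)
    have hlen : (sieveStep v nd x).length = nd.length := by simp [sieveStep]
    rw [List.foldl_cons, ih (sieveStep v nd x) hnd.of_cons
      (by intro y hy; have := hb y (by simp [hy]); omega) j]
    by_cases hjL : (j : Int) ∈ L
    · have hxj : x ≠ (j : Int) := by
        intro h; exact (List.nodup_cons.mp hnd).1 (h ▸ hjL)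
      have hS : (sieveStep v nd x).getD j 0 = nd.getD j 0 := by
        rw [sieveStep, getD_set_eq, if_neg (by intro h; exact hxj (by omega))]
      rw [if_pos hjL, if_pos (List.mem_cons_of_mem _ hjL), hS]
    · by_cases hxj : x = (j : Int)
      · have hxt : x.toNat = j := by omega
        have hS : (sieveStep v nd x).getD j 0 = PySem.Int.mod (nd.getD j 0 + v) 1000000007 := by
          rw [sieveStep, getD_set_eq, hxt, if_pos ⟨rfl, by omega⟩]
        rw [if_neg hjL, hS, if_pos (by simp [hxj])]
      · have hS : (sieveStep v nd x).getD j 0 = nd.getD j 0 := by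
          rw [sieveStep, getD_set_eq, if_neg (by intro h; exact hxj (by omega))]
        rw [if_neg hjL, hS, if_neg (by
          simp only [List.mem_cons]
          push Not
          exact ⟨fun h => hxj h.symm, hjL⟩)]

theorem mem_multiples {k m j : Int} (hk : 1 ≤ k) (hj1 : 1 ≤ j) (hjm : j ≤ m) :
    j ∈ PySem.List.pyRange k (m + 1) k ↔ k ∣ j := by
  rw [PySem.List.mem_pyRange_iff_of_pos (by omega)]
  constructor
  · rintro ⟨h1, h2, d, hd⟩
    exact ⟨d + 1, by linarith [hd]⟩
  · intro hd
    refine ⟨Int.le_of_dvd (by omega) hd, by omega, ?_⟩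
    obtain ⟨c, hc⟩ := hd
    exact ⟨c - 1, by linarith [hc]⟩

theorem nodup_multiples (k b : Int) (hk : 0 < k) : (PySem.List.pyRange k b k).Nodup := by
  rw [PySem.List.pyRange_of_pos _ _ hk]
  refine List.Nodup.map ?_ List.nodup_range
  intro a b' h
  have : (a : Int) = (b' : Int) := by
    have hne : k ≠ 0 := by omega
    have := mul_left_cancel₀ hne (by linarith [h] : k * (a:Int) = k * (b':Int))
    exact this
  exact_mod_cast this

def fstep (prev : Int → Int) (j : Int) : Int :=
  (PySem.List.pyRange 1 (j + 1)).foldl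
    (fun a k => if PySem.Int.mod j k == 0 then PySem.Int.mod (a + prev k) 1000000007 else a) 0

def frow : Nat → Int → Int
  | 0 => fun j => if j = 1 then 1 else 0
  | i + 1 => fstep (frow i)

def kStep (dp : List Int) (m : Int) (nd : List Int) (k : Int) : List Int :=
  let v := dp.getD k.toNat 0
  (PySem.List.pyRange k (m + 1) k).foldl (sieveStep v) nd

theorem length_foldl_kstep (dp : List Int) (m : Int) (ks : List Int) (nd : List Int) :
    (ks.foldl (kStep dp m) nd).length = nd.length := by
  induction ks generalizing nd with
  | nil => rfl
  | cons x ks ih => rw [List.foldl_cons, ih]; exact length_foldl_sieve _ _ _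

theorem foldl_kstep_getD (dp : List Int) (m : Int) (hm : 1 ≤ m) :
    ∀ (ks : List Int) (nd : List Int), nd.length = (m + 1).toNat →
    (∀ x ∈ ks, 1 ≤ x) → ∀ j : Int, 1 ≤ j → j ≤ m →
    (ks.foldl (kStep dp m) nd).getD j.toNat 0 =
      ks.foldl (fun a k => if k ∣ j then PySem.Int.mod (a + dp.getD k.toNat 0) 1000000007 else a)
        (nd.getD j.toNat 0) := by
  intro ks
  induction ks with
  | nil => intro nd _ _ j _ _; rfl
  | cons k ks ih =>
    intro nd hlen hb j hj1 hjm
    have hk1 : 1 ≤ k := hb k (by simp)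
    have hK : (kStep dp m nd k).getD j.toNat 0 =
        if k ∣ j then PySem.Int.mod (nd.getD j.toNat 0 + dp.getD k.toNat 0) 1000000007
        else nd.getD j.toNat 0 := by
      rw [kStep]
      have := foldl_sieve_getD (dp.getD k.toNat 0) (PySem.List.pyRange k (m + 1) k) nd
        (nodup_multiples k (m + 1) (by omega))
        (by
          intro x hx
          rw [PySem.List.mem_pyRange_iff_of_pos (by omega)] at hx
          constructor <;> omega) j.toNat
      rw [this]
      have hcast : ((j.toNat : Int)) = j := by omega
      rw [hcast]
      simp only [mem_multiples hk1 hj1 hjm]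
    have hlen' : (kStep dp m nd k).length = (m + 1).toNat := by
      rw [kStep]; rw [length_foldl_sieve]; exact hlen
    rw [List.foldl_cons, List.foldl_cons,
      ih (kStep dp m nd k) hlen' (fun x hx => hb x (by simp [hx])) j hj1 hjm, hK]

theorem fold_divisors_eq_fstep (prev : Int → Int) (dp : List Int) (m j : Int)
    (hj1 : 1 ≤ j) (hjm : j ≤ m)
    (hdp : ∀ k : Int, 1 ≤ k → k ≤ m → dp.getD k.toNat 0 = prev k) :
    (PySem.List.pyRange 1 (m + 1)).foldl
      (fun a k => if k ∣ j then PySem.Int.mod (a + dp.getD k.toNat 0) 1000000007 else a) 0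
    = fstep prev j := by
  rw [PySem.List.pyRange_one_append 1 (j + 1) (m + 1) (by omega) (by omega), List.foldl_append]
  have h1 : (PySem.List.pyRange 1 (j + 1)).foldl
      (fun a k => if k ∣ j then PySem.Int.mod (a + dp.getD k.toNat 0) 1000000007 else a) 0
      = fstep prev j := by
    rw [fstep]
    apply PySem.List.foldl_congr_mem
    intro a k hk
    rw [PySem.List.mem_pyRange_one] at hk
    have hcond : (PySem.Int.mod j k == 0) = decide (k ∣ j) := by
      rw [Bool.eq_iff_iff]
      simp [PySem.Int.mod_eq_zero_iff_dvd]
    rw [hcond, hdp k (by omega) (by omega)]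
    by_cases hd : k ∣ j
    · rw [if_pos hd, if_pos (by simp [hd])]
    · rw [if_neg hd, if_neg (by simp [hd])]
  rw [h1]
  have h2 : (PySem.List.pyRange (j + 1) (m + 1)).foldl
      (fun a k => if k ∣ j then PySem.Int.mod (a + dp.getD k.toNat 0) 1000000007 else a)
      (fstep prev j) = (PySem.List.pyRange (j + 1) (m + 1)).foldl
      (fun acc _ => acc) (fstep prev j) := by
    apply PySem.List.foldl_congr_mem
    intro a k hk
    rw [PySem.List.mem_pyRange_one] at hk
    rw [if_neg (by intro hd; have := Int.le_of_dvd (by omega) hd; omega)]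
  rw [h2, PySem.List.foldl_ignore]

def bStep (m : Int) (dp : List Int) : List Int :=
  (PySem.List.pyRange 1 (m + 1)).foldl (kStep dp m) (List.replicate (m + 1).toNat 0)

theorem getD_replicate_zero (K i : Nat) : (List.replicate K (0 : Int)).getD i 0 = 0 := by
  simp [List.getD_eq_getElem?_getD, List.getElem?_replicate]
  split_ifs <;> rfl

theorem bStep_getD (m : Int) (hm : 1 ≤ m) (dp : List Int) (prev : Int → Int)
    (hdp : ∀ k : Int, 1 ≤ k → k ≤ m → dp.getD k.toNat 0 = prev k) :
    (bStep m dp).length = (m + 1).toNat ∧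
    ∀ j : Int, 1 ≤ j → j ≤ m → (bStep m dp).getD j.toNat 0 = fstep prev j := by
  constructor
  · rw [bStep, length_foldl_kstep, List.length_replicate]
  · intro j hj1 hjm
    rw [bStep, foldl_kstep_getD dp m hm _ _ (by simp)
      (by intro x hx; rw [PySem.List.mem_pyRange_one] at hx; omega) j hj1 hjm,
      getD_replicate_zero]
    exact fold_divisors_eq_fstep prev dp m j hj1 hjm hdp

theorem foldl_ignore_arg {A : Type} (F : List Int → List Int) :
    ∀ (L : List A) (x : List Int), L.foldl (fun acc _ => F acc) x = F^[L.length] x := by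
  intro L
  induction L with
  | nil => intro x; rfl
  | cons a L ih =>
    intro x
    rw [List.foldl_cons, ih, List.length_cons, Function.iterate_succ_apply]

theorem iterate_bStep (m : Int) (hm : 1 ≤ m) :
    ∀ (N t : Nat) (dp : List Int), dp.length = (m + 1).toNat →
    (∀ j : Int, 1 ≤ j → j ≤ m → dp.getD j.toNat 0 = frow t j) →
    ((bStep m)^[N] dp).length = (m + 1).toNat ∧
    ∀ j : Int, 1 ≤ j → j ≤ m → ((bStep m)^[N] dp).getD j.toNat 0 = frow (t + N) j := by
  intro N
  induction N with
  | zero => intro t dp hlen hdp; simpa using ⟨hlen, hdp⟩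
  | succ N ih =>
    intro t dp hlen hdp
    rw [Function.iterate_succ_apply]
    have hb := bStep_getD m hm dp (frow t) hdp
    have := ih (t + 1) (bStep m dp) hb.1 (by
      intro j hj1 hjm
      rw [hb.2 j hj1 hjm]
      rfl)
    refine ⟨this.1, fun j hj1 hjm => ?_⟩
    rw [this.2 j hj1 hjm]
    congr 1
    omega

theorem solve_alt_eq (n m : Int) (hn : 0 ≤ n) (hm : 1 ≤ m) :
    solve_alt n m = (PySem.List.pyRange 1 (m + 1)).foldl
      (fun res i => PySem.Int.mod (res + frow n.toNat i) 1000000007) 0 := by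
  have hrw : solve_alt n m = (PySem.List.pyRange 1 (m + 1)).foldl
      (fun res i => PySem.Int.mod (res +
        ((PySem.List.pyRange 0 n).foldl (fun dp _ => bStep m dp)
          ((List.replicate (m + 1).toNat 0).set 1 1)).getD i.toNat 0) 1000000007) 0 := rfl
  rw [hrw, foldl_ignore_arg (bStep m)]
  have hN : (PySem.List.pyRange 0 n).length = n.toNat := by
    rw [PySem.List.length_pyRange_one]
    omega
  rw [hN]
  have hinit : ∀ j : Int, 1 ≤ j → j ≤ m →
      (((List.replicate (m + 1).toNat 0).set 1 1).getD j.toNat 0) = frow 0 j := by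
    intro j hj1 hjm
    rw [getD_set_eq]
    by_cases hj : j = 1
    · rw [if_pos (by subst hj; simp; omega)]
      simp [frow, hj]
    · rw [if_neg (by intro h; exact hj (by omega)), getD_replicate_zero]
      simp [frow, hj]
  have := iterate_bStep m hm n.toNat 0 _ (by simp) hinit
  apply PySem.List.foldl_congr_mem
  intro a i hi
  rw [PySem.List.mem_pyRange_one] at hi
  rw [this.2 i (by omega) (by omega)]
  simp

def aStepK (i j : Int) (T : List (List Int)) (k : Int) : List (List Int) :=
  if PySem.Int.mod j k == 0 then
    T.modify i.toNat (fun r =>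
      r.set j.toNat (PySem.Int.mod (r.getD j.toNat 0 +
        (T.getD (i - 1).toNat []).getD k.toNat 0) 1000000007))
  else T

def aStepJ (i : Int) (T : List (List Int)) (j : Int) : List (List Int) :=
  (PySem.List.pyRange 1 (j + 1)).foldl (aStepK i j) T

def aStepI (m : Int) (T : List (List Int)) (i : Int) : List (List Int) :=
  (PySem.List.pyRange 1 (m + 1)).foldl (aStepJ i) T

def initTable (n m : Int) : List (List Int) :=
  (List.replicate (n + 1).toNat (List.replicate (m + 1).toNat 0)).modify 0 (fun r => r.set 1 1)

theorem aStepK_fold (i j m : Int) (hi : 1 ≤ i) (hj1 : 1 ≤ j) (hjm : j ≤ m) (prev : Int → Int) :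
    ∀ (ks : List Int) (T : List (List Int)),
    (∀ x ∈ ks, 1 ≤ x ∧ x ≤ j) →
    i.toNat < T.length →
    (T.getD i.toNat []).length = (m + 1).toNat →
    (∀ k : Int, 1 ≤ k → k ≤ m → (T.getD (i - 1).toNat []).getD k.toNat 0 = prev k) →
    ((ks.foldl (aStepK i j) T).length = T.length ∧
      (∀ i' : Nat, i' ≠ i.toNat →
        (ks.foldl (aStepK i j) T).getD i' [] = T.getD i' []) ∧
      ((ks.foldl (aStepK i j) T).getD i.toNat []).length = (m + 1).toNat ∧
      (∀ y : Nat, y ≠ j.toNat →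
        ((ks.foldl (aStepK i j) T).getD i.toNat []).getD y 0 = (T.getD i.toNat []).getD y 0) ∧
      ((ks.foldl (aStepK i j) T).getD i.toNat []).getD j.toNat 0 =
        ks.foldl (fun a k => if PySem.Int.mod j k == 0 then PySem.Int.mod (a + prev k) 1000000007 else a)
          ((T.getD i.toNat []).getD j.toNat 0)) := by
  intro ks
  induction ks with
  | nil =>
    intro T _ _ hrow _
    exact ⟨rfl, fun _ _ => rfl, hrow, fun _ _ => rfl, rfl⟩
  | cons k ks ih =>
    intro T hb hiT hrow hprev
    have hk := hb k (by simp)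
    -- facts about the single step T' = aStepK i j T k
    have hstep : (aStepK i j T k).length = T.length ∧
        (∀ i' : Nat, i' ≠ i.toNat → (aStepK i j T k).getD i' [] = T.getD i' []) ∧
        ((aStepK i j T k).getD i.toNat []).length = (m + 1).toNat ∧
        (∀ y : Nat, y ≠ j.toNat →
          ((aStepK i j T k).getD i.toNat []).getD y 0 = (T.getD i.toNat []).getD y 0) ∧
        ((aStepK i j T k).getD i.toNat []).getD j.toNat 0 =
          (if PySem.Int.mod j k == 0 then
            PySem.Int.mod ((T.getD i.toNat []).getD j.toNat 0 + prev k) 1000000007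
          else (T.getD i.toNat []).getD j.toNat 0) := by
      rw [aStepK]
      by_cases hc : (PySem.Int.mod j k == 0) = true
      · rw [if_pos hc, if_pos hc]
        have hrowi : ∀ y : Nat, (T.modify i.toNat (fun r =>
            r.set j.toNat (PySem.Int.mod (r.getD j.toNat 0 +
              (T.getD (i - 1).toNat []).getD k.toNat 0) 1000000007))).getD i.toNat [] =
            (T.getD i.toNat []).set j.toNat (PySem.Int.mod ((T.getD i.toNat []).getD j.toNat 0 +
              (T.getD (i - 1).toNat []).getD k.toNat 0) 1000000007) := by
          intro _
          rw [getD_modify_eq, if_pos ⟨rfl, hiT⟩]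
        refine ⟨by simp, fun i' hi' => ?_, ?_, fun y hy => ?_, ?_⟩
        · rw [getD_modify_eq, if_neg (by intro h; exact hi' h.1.symm)]
        · rw [hrowi 0, List.length_set, hrow]
        · rw [hrowi 0, getD_set_eq, if_neg (by intro h; exact hy h.1.symm)]
        · rw [hrowi 0, getD_set_eq, if_pos ⟨rfl, by rw [hrow]; omega⟩,
            hprev k (by omega) (by omega)]
      · rw [if_neg hc, if_neg hc]
        exact ⟨rfl, fun _ _ => rfl, hrow, fun _ _ => rfl, rfl⟩
    -- apply ih to T'
    have hih := ih (aStepK i j T k)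
      (fun x hx => hb x (by simp [hx]))
      (by rw [hstep.1]; exact hiT)
      hstep.2.2.1
      (by
        intro k' h1 h2
        have hne : (i - 1).toNat ≠ i.toNat := by omega
        rw [hstep.2.1 _ hne]
        exact hprev k' h1 h2)
    rw [List.foldl_cons, List.foldl_cons]
    refine ⟨by rw [hih.1, hstep.1], fun i' hi' => ?_, hih.2.2.1, fun y hy => ?_, ?_⟩
    · rw [hih.2.1 i' hi', hstep.2.1 i' hi']
    · rw [hih.2.2.2.1 y hy, hstep.2.2.2.1 y hy]
    · rw [hih.2.2.2.2, hstep.2.2.2.2]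

theorem aStepJ_fold (i m : Int) (hi : 1 ≤ i) (hm : 1 ≤ m) (prev : Int → Int) :
    ∀ (js : List Int) (T : List (List Int)),
    (∀ x ∈ js, 1 ≤ x ∧ x ≤ m) → js.Nodup →
    i.toNat < T.length →
    (T.getD i.toNat []).length = (m + 1).toNat →
    (∀ k : Int, 1 ≤ k → k ≤ m → (T.getD (i - 1).toNat []).getD k.toNat 0 = prev k) →
    ((js.foldl (aStepJ i) T).length = T.length ∧
      (∀ i' : Nat, i' ≠ i.toNat → (js.foldl (aStepJ i) T).getD i' [] = T.getD i' []) ∧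
      ((js.foldl (aStepJ i) T).getD i.toNat []).length = (m + 1).toNat ∧
      (∀ y : Nat, (y : Int) ∉ js →
        ((js.foldl (aStepJ i) T).getD i.toNat []).getD y 0 = (T.getD i.toNat []).getD y 0) ∧
      (∀ x ∈ js, (T.getD i.toNat []).getD x.toNat 0 = 0 →
        ((js.foldl (aStepJ i) T).getD i.toNat []).getD x.toNat 0 = fstep prev x)) := by
  intro js
  induction js with
  | nil =>
    intro T _ _ _ hrow _
    exact ⟨rfl, fun _ _ => rfl, hrow, fun _ _ => rfl, fun x hx => absurd hx (by simp)⟩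
  | cons j js ih =>
    intro T hb hnd hiT hrow hprev
    have hj := hb j (by simp)
    have hstep := aStepK_fold i j m hi hj.1 hj.2 prev (PySem.List.pyRange 1 (j + 1)) T
      (by intro x hx; rw [PySem.List.mem_pyRange_one] at hx; omega)
      hiT hrow hprev
    rw [show List.foldl (aStepK i j) T (PySem.List.pyRange 1 (j + 1)) = aStepJ i T j from rfl] at hstep
    have hstep1 : (aStepJ i T j).length = T.length := hstep.1
    have hih := ih (aStepJ i T j)
      (fun x hx => hb x (by simp [hx]))
      hnd.of_cons
      (by rw [hstep1]; exact hiT)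
      hstep.2.2.1
      (by
        intro k' h1 h2
        have hne : (i - 1).toNat ≠ i.toNat := by omega
        rw [hstep.2.1 _ hne]
        exact hprev k' h1 h2)
    rw [List.foldl_cons]
    refine ⟨by rw [hih.1, hstep1], fun i' hi' => ?_, hih.2.2.1, fun y hy => ?_, ?_⟩
    · rw [hih.2.1 i' hi', hstep.2.1 i' hi']
    · have hyj : y ≠ j.toNat := by
        intro h
        exact hy (by simp [h]; omega)
      rw [hih.2.2.2.1 y (by intro h; exact hy (List.mem_cons_of_mem _ h)),
        hstep.2.2.2.1 y hyj]
    · intro x hx hx0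
      rcases List.mem_cons.mp hx with hxj | hxjs
      · subst hxj
        have hnotin : ((x.toNat : Int)) ∉ js := by
          rw [show ((x.toNat : Int)) = x by omega]
          exact (List.nodup_cons.mp hnd).1
        rw [hih.2.2.2.1 x.toNat hnotin, hstep.2.2.2.2, hx0]
        rfl
      · have hx1 := (hb x (by simp [hxjs])).1
        have hxj : x.toNat ≠ j.toNat := by
          have : x ≠ j := by
            intro h
            exact (List.nodup_cons.mp hnd).1 (h ▸ hxjs)
          omega
        refine hih.2.2.2.2 x hxjs ?_
        rw [hstep.2.2.2.1 x.toNat hxj]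
        exact hx0

theorem getD_replicate_row (K i : Nat) (r : List Int) (hi : i < K) :
    (List.replicate K r).getD i [] = r := by
  simp [List.getD_eq_getElem?_getD, hi]

theorem initTable_facts (n m : Int) (hn : 0 ≤ n) (hm : 1 ≤ m) :
    (initTable n m).length = (n + 1).toNat ∧
    (∀ i' : Nat, i' < (n + 1).toNat → ((initTable n m).getD i' []).length = (m + 1).toNat) ∧
    (∀ j : Int, 1 ≤ j → j ≤ m → ((initTable n m).getD 0 []).getD j.toNat 0 = frow 0 j) ∧
    (∀ i' : Nat, 0 < i' → i' < (n + 1).toNat →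
      (initTable n m).getD i' [] = List.replicate (m + 1).toNat 0) := by
  have h0 : (0 : Nat) < (n + 1).toNat := by omega
  have hrow0 : (initTable n m).getD 0 [] = (List.replicate (m + 1).toNat (0 : Int)).set 1 1 := by
    rw [initTable, getD_modify_eq, if_pos ⟨rfl, by simp; omega⟩,
      getD_replicate_row _ _ _ h0]
  refine ⟨by simp [initTable], fun i' hi' => ?_, fun j hj1 hjm => ?_, fun i' hi'0 hi' => ?_⟩
  · by_cases h : i' = 0
    · subst h; rw [hrow0]; simp
    · rw [initTable, getD_modify_eq, if_neg (by intro hcc; exact h hcc.1.symm),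
        getD_replicate_row _ _ _ (by simpa [initTable] using hi')]
      simp
  · rw [hrow0, getD_set_eq]
    by_cases hj : j = 1
    · rw [if_pos (by subst hj; simp; omega)]
      simp [frow, hj]
    · rw [if_neg (by intro h; exact hj (by omega)), getD_replicate_zero]
      simp [frow, hj]
  · rw [initTable, getD_modify_eq, if_neg (by intro hcc; omega),
      getD_replicate_row _ _ _ (by simpa [initTable] using hi')]

theorem aStepI_iter (n m : Int) (hn : 0 ≤ n) (hm : 1 ≤ m) :
    ∀ (N : Nat), (N : Int) ≤ n →
    (((PySem.List.pyRange 1 ((N : Int) + 1)).foldl (aStepI m) (initTable n m)).length = (n + 1).toNat ∧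
      (∀ i' : Nat, i' < (n + 1).toNat →
        (((PySem.List.pyRange 1 ((N : Int) + 1)).foldl (aStepI m) (initTable n m)).getD i' []).length = (m + 1).toNat) ∧
      (∀ i' : Nat, i' ≤ N → ∀ j : Int, 1 ≤ j → j ≤ m →
        (((PySem.List.pyRange 1 ((N : Int) + 1)).foldl (aStepI m) (initTable n m)).getD i' []).getD j.toNat 0 = frow i' j) ∧
      (∀ i' : Nat, N < i' → i' < (n + 1).toNat →
        ((PySem.List.pyRange 1 ((N : Int) + 1)).foldl (aStepI m) (initTable n m)).getD i' [] =
          List.replicate (m + 1).toNat 0)) := by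
  intro N
  induction N with
  | zero =>
    intro _
    rw [show ((0 : Nat) : Int) + 1 = 1 by norm_num, PySem.List.pyRange_one_eq_nil (by omega)]
    obtain ⟨h1, h2, h3, h4⟩ := initTable_facts n m hn hm
    exact ⟨h1, h2, fun i' hi' j hj1 hjm => by
      interval_cases i'
      exact h3 j hj1 hjm, h4⟩
  | succ N ih =>
    intro hN1
    have hNn : (N : Int) ≤ n := by push_cast at hN1 ⊢; omega
    obtain ⟨h1, h2, h3, h4⟩ := ih hNn
    have hsplit : PySem.List.pyRange 1 ((↑(N + 1) : Int) + 1) =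
        PySem.List.pyRange 1 ((N : Int) + 1) ++ [(N : Int) + 1] := by
      rw [show ((↑(N + 1) : Int) + 1) = ((N : Int) + 1) + 1 by push_cast; ring]
      exact PySem.List.pyRange_one_succ_right (by omega)
    rw [hsplit, List.foldl_append]
    set T := (PySem.List.pyRange 1 ((N : Int) + 1)).foldl (aStepI m) (initTable n m) with hT
    rw [List.foldl_cons, List.foldl_nil]
    have hi1 : (1 : Int) ≤ (N : Int) + 1 := by omega
    have hitoNat : ((N : Int) + 1).toNat = N + 1 := by omega
    have hNlt : N + 1 < (n + 1).toNat := by omega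
    have hrowNi : T.getD (N + 1) [] = List.replicate (m + 1).toNat 0 :=
      h4 (N + 1) (by omega) hNlt
    have hfold := aStepJ_fold ((N : Int) + 1) m hi1 hm (frow N)
      (PySem.List.pyRange 1 (m + 1)) T
      (by intro x hx; rw [PySem.List.mem_pyRange_one] at hx; omega)
      (PySem.List.nodup_pyRange_one _ _)
      (by rw [hitoNat, h1]; omega)
      (by rw [hitoNat, hrowNi]; simp)
      (by
        intro k h1k h2k
        rw [show ((N : Int) + 1 - 1).toNat = N by omega]
        exact h3 N (le_refl N) k h1k h2k)
    rw [show aStepI m T ((N : Int) + 1) =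
      (PySem.List.pyRange 1 (m + 1)).foldl (aStepJ ((N : Int) + 1)) T from rfl]
    rw [hitoNat] at hfold
    refine ⟨by rw [hfold.1, h1], fun i' hi' => ?_, fun i' hi' j hj1 hjm => ?_, fun i' hi'N hi' => ?_⟩
    · by_cases h : i' = N + 1
      · subst h; exact hfold.2.2.1
      · rw [hfold.2.1 i' h]; exact h2 i' hi'
    · by_cases h : i' = N + 1
      · subst h
        have hjmem : j ∈ PySem.List.pyRange 1 (m + 1) := by
          rw [PySem.List.mem_pyRange_one]; omega
        rw [hfold.2.2.2.2 j hjmem (by rw [hrowNi]; exact getD_replicate_zero _ _)]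
        rfl
      · rw [hfold.2.1 i' h]
        exact h3 i' (by omega) j hj1 hjm
    · rw [hfold.2.1 i' (by omega)]
      exact h4 i' (by omega) hi'

theorem solve_eq (n m : Int) (hn : 0 ≤ n) (hm : 1 ≤ m) :
    solve n m = (PySem.List.pyRange 1 (m + 1)).foldl
      (fun res i => PySem.Int.mod (res + frow n.toNat i) 1000000007) 0 := by
  have hrfl : solve n m = (PySem.List.pyRange 1 (m + 1)).foldl
      (fun res i => PySem.Int.mod (res +
        (((PySem.List.pyRange 1 (n + 1)).foldl (aStepI m) (initTable n m)).getD n.toNat []).getD i.toNat 0)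
        1000000007) 0 := rfl
  rw [hrfl]
  have hcast : ((n.toNat : Int)) = n := by omega
  have hiter := aStepI_iter n m hn hm n.toNat (by omega)
  rw [hcast] at hiter
  apply PySem.List.foldl_congr_mem
  intro a i hi
  rw [PySem.List.mem_pyRange_one] at hi
  rw [hiter.2.2.1 n.toNat (le_refl _) i (by omega) (by omega)]

-- ===== VERDICT (by name: the statement is the Claim_ definition above) =====
theorem solve_spec : Claim_equal_solve := by
  intro n m _ hp
  unfold Spec_solve
  rw [solve_eq n m hp.1 hp.2, solve_alt_eq n m hp.1 hp.2]
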